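-- pv_equiv track=rewrite | github.com/ikedaaaaa/AssertivePointTabulation | main.py | calculate
-- ===== SOURCE A (Python) =====
-- from collections import defaultdict
--
-- def calculate(personal_assertive_point_list):
--     personal_assertive_total_point_list = []
--     total_points_by_session = defaultdict(int)
--     session_counts = defaultdict(int)
--     i = 0
--     for evaluator_data in personal_assertive_point_list:
--         evaluator_totals = {}
--         for session, points in evaluator_data.items():
--             total_points = sum(sum(point_set) for point_set in points)
--             evaluator_totals[session] = total_points
--
--
--             total_points_by_session[session] += total_points
--             session_counts[session] += 1
--
--         personal_assertive_total_point_list.append(evaluator_totals)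
--
--     for total_data in personal_assertive_total_point_list:
--
--
--         i += 1
--
--     assertive_average_point = {
--         session: total_points_by_session[session] // session_counts[session]
--         for session in total_points_by_session
--     }
--
--     return personal_assertive_total_point_list,assertive_average_point
-- ===== SOURCE B (Python) =====
-- def calculate(personal_assertive_point_list):
--     # Phase 1: per-evaluator session totals
--     personal_assertive_total_point_list = [
--         {session: sum(sum(point_set) for point_set in points)
--          for session, points in evaluator_data.items()}
--         for evaluator_data in personal_assertive_point_list
--     ]
--     # Phase 2: session names in first-appearance order, straight from the input
--     sessions = []
--     for evaluator_data in personal_assertive_point_list: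
--         for session in evaluator_data:
--             if session not in sessions:
--                 sessions.append(session)
--     # Phase 3: averages per session from the totals already computed
--     assertive_average_point = {}
--     for session in sessions:
--         values = [totals[session] for totals in personal_assertive_total_point_list
--                   if session in totals]
--         assertive_average_point[session] = sum(values) // len(values)
--     return personal_assertive_total_point_list, assertive_average_point
-- ===== Notes on version B (the rewrite author's own statement) =====
-- stated objective: simpler
-- what changed: B replaces A's single interleaved loop threading two running defaultdicts with three independent phases: a comprehension for per-evaluator totals, a first-appearance scan of the input for session names, and a per-session gather (comprehension + sum // len) for the averages, dropping A's dead i-loop. Pre_ excludes association lists repeating a session key within one evaluator, which do not represent Python dicts.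
import Mathlib
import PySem

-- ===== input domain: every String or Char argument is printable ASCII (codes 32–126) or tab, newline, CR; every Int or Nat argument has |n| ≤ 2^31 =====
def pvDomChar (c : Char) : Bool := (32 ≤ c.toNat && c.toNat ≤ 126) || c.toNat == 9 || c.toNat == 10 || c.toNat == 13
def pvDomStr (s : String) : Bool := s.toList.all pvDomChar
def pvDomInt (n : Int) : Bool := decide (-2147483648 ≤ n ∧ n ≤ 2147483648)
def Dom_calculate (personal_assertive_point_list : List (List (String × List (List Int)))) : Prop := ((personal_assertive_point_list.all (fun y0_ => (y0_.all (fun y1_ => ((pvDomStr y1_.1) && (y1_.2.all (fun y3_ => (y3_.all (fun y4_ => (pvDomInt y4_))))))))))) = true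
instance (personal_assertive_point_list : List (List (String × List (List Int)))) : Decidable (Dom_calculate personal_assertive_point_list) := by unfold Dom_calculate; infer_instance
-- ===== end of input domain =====

-- B recomputes the same totals and averages in three independent phases (per-evaluator totals,
-- first-appearance session list, per-session gather) instead of A's single loop threading two
-- running defaultdicts; objective: simpler.


-- ===== PORT A =====
-- sum(sum(point_set) for point_set in points), used by both Pythons verbatim
def sumPoints (points : List (List Int)) : Int := (points.map (fun ps => ps.sum)).sum

-- inner loop body of A: state = (evaluator_totals, total_points_by_session, session_counts)
def calcInnerA (st : PySem.Dict String Int × PySem.Dict String Int × PySem.Dict String Int)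
    (p : String × List (List Int)) :
    PySem.Dict String Int × PySem.Dict String Int × PySem.Dict String Int :=
  let tp := sumPoints p.2
  (st.1.insert p.1 tp, st.2.1.modify p.1 0 (· + tp), st.2.2.modify p.1 0 (· + 1))

-- outer loop body of A: state = (personal_assertive_total_point_list, totals dict, counts dict)
def calcOuterA (st : List (List (String × Int)) × PySem.Dict String Int × PySem.Dict String Int)
    (ev : List (String × List (List Int))) :
    List (List (String × Int)) × PySem.Dict String Int × PySem.Dict String Int :=
  let r := ev.foldl calcInnerA (PySem.Dict.empty, st.2.1, st.2.2)
  (st.1 ++ [r.1.items], r.2.1, r.2.2)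

def calculate (personal_assertive_point_list : List (List (String × List (List Int)))) : (List (List (String × Int))) × (List (String × Int)) :=
  let st := personal_assertive_point_list.foldl calcOuterA ([], PySem.Dict.empty, PySem.Dict.empty)
  -- the dead 'for total_data: i += 1' loop has no effect and is omitted
  let avg := st.2.1.keys.foldl
    (fun d s => d.insert s (PySem.Int.floordiv (st.2.1.getD s 0) (st.2.2.getD s 0)))
    PySem.Dict.empty
  (st.1, avg.items)

-- ===== PORT B =====
-- Phase 1 helper: {session: sum(sum(ps) for ps in points) for session, points in ev.items()}
def evTotalsB (ev : List (String × List (List Int))) : PySem.Dict String Int :=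
  ev.foldl (fun d p => d.insert p.1 (sumPoints p.2)) PySem.Dict.empty

def calculate_alt (personal_assertive_point_list : List (List (String × List (List Int)))) : (List (List (String × Int))) × (List (String × Int)) :=
  let totals_list := personal_assertive_point_list.map evTotalsB
  -- Phase 2: session names in first-appearance order, from the input
  let sessions := personal_assertive_point_list.foldl
    (fun acc ev => PySem.Set.update acc (ev.map (fun p => p.1))) PySem.Set.empty
  -- Phase 3: averages
  let avg := sessions.foldl
    (fun d s =>
      let vals := (totals_list.filter (fun t => t.contains s)).map (fun t => t.getD s 0)
      d.insert s (PySem.Int.floordiv vals.sum (vals.length : Int)))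
    PySem.Dict.empty
  (totals_list.map (fun d => d.items), avg.items)

-- ===== PRECONDITION & SPEC =====
-- Pre_ excludes inputs in which some evaluator's association list repeats a session key:
-- such lists do not represent Python dicts (A's per-evaluator argument is a dict), so
-- neither Python behaviour is defined there.
def Pre_calculate (personal_assertive_point_list : List (List (String × List (List Int)))) : Prop :=
  ∀ ev ∈ personal_assertive_point_list, (ev.map (fun p => p.1)).Nodup
instance (personal_assertive_point_list : List (List (String × List (List Int)))) : Decidable (Pre_calculate personal_assertive_point_list) := by unfold Pre_calculate; infer_instance

def pvWitness_calculate : (List (List (String × List (List Int)))) :=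
  [[("a", [[1], [2]]), ("b", [[3]])], [("a", [[4, 5]])]]

def Spec_calculate (personal_assertive_point_list : List (List (String × List (List Int)))) (out : (List (List (String × Int))) × (List (String × Int))) : Prop := out = calculate_alt personal_assertive_point_list
instance (personal_assertive_point_list : List (List (String × List (List Int)))) (out : (List (List (String × Int))) × (List (String × Int))) : Decidable (Spec_calculate personal_assertive_point_list out) := by unfold Spec_calculate; infer_instance

-- ===== CLAIM (what is proved, stated in full; the proofs are below) =====
def Claim_equal_calculate : Prop := ∀ (personal_assertive_point_list : List (List (String × List (List Int)))), Dom_calculate personal_assertive_point_list → Pre_calculate personal_assertive_point_list → Spec_calculate personal_assertive_point_list (calculate personal_assertive_point_list)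

-- ===== LEMMAS AND PROOFS =====

-- A's inner loop acts independently on the three components of its state
theorem innerA_decomp (ev : List (String × List (List Int)))
    (et tot cnt : PySem.Dict String Int) :
    ev.foldl calcInnerA (et, tot, cnt) =
      (ev.foldl (fun d p => d.insert p.1 (sumPoints p.2)) et,
       ev.foldl (fun d p => d.modify p.1 0 (· + sumPoints p.2)) tot,
       ev.foldl (fun d p => d.modify p.1 0 (· + 1)) cnt) := by
  induction ev generalizing et tot cnt with
  | nil => rfl
  | cons p t ih => simp [List.foldl, calcInnerA, ih]

-- A's outer loop, decomposed: the per-evaluator dicts are B's evTotalsB, and the two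
-- running dicts are folds over the flattened list of (session, points) pairs
theorem outerA_decomp (pl : List (List (String × List (List Int))))
    (acc : List (List (String × Int))) (tot cnt : PySem.Dict String Int) :
    pl.foldl calcOuterA (acc, tot, cnt) =
      (acc ++ pl.map (fun ev => (evTotalsB ev).items),
       pl.flatten.foldl (fun d p => d.modify p.1 0 (· + sumPoints p.2)) tot,
       pl.flatten.foldl (fun d p => d.modify p.1 0 (· + 1)) cnt) := by
  induction pl generalizing acc tot cnt with
  | nil => simp
  | cons ev t ih =>
    simp only [List.foldl, List.flatten_cons, List.foldl_append, List.map_cons]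
    rw [show calcOuterA (acc, tot, cnt) ev =
        (acc ++ [(evTotalsB ev).items],
         ev.foldl (fun d p => d.modify p.1 0 (· + sumPoints p.2)) tot,
         ev.foldl (fun d p => d.modify p.1 0 (· + 1)) cnt) from by
      simp [calcOuterA, innerA_decomp, evTotalsB]]
    rw [ih]
    simp

-- value of the running-total fold at a key
theorem getD_fold_modify_add (g : (String × List (List Int)) → Int)
    (L : List (String × List (List Int))) (d : PySem.Dict String Int) (s : String) :
    (L.foldl (fun d p => d.modify p.1 0 (· + g p)) d).getD s 0 =
      d.getD s 0 + ((L.filter (fun p => p.1 == s)).map g).sum := by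
  induction L generalizing d with
  | nil => simp
  | cons p t ih =>
    simp only [List.foldl, List.filter_cons]
    by_cases h : p.1 = s
    · simp [h, ih, add_assoc]
    · have hb : (p.1 == s) = false := by simp [h]
      have h2 : ¬ s = p.1 := fun e => h e.symm
      simp [hb, ih, PySem.Dict.getD_modify, h2]

-- keys of the running-total folds: all sessions, in first-appearance order
theorem keys_fold_modify (g : PySem.Dict String Int → (String × List (List Int)) → Int → Int)
    (L : List (String × List (List Int))) :
    (L.foldl (fun d p => d.modify p.1 0 (g d p)) PySem.Dict.empty).keys =
      PySem.Set.ofList (L.map (fun p => p.1)) := by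
  have h := PySem.Dict.keys_foldl_modify_key L (fun p => p.1) 0 g PySem.Dict.empty
  rw [h]
  exact PySem.Set.update_empty _

-- B's session scan is the first-appearance list of all sessions
theorem sessions_eq (pl : List (List (String × List (List Int)))) (acc : PySem.Set String) :
    pl.foldl (fun acc ev => PySem.Set.update acc (ev.map (fun p => p.1))) acc =
      PySem.Set.update acc (pl.flatten.map (fun p => p.1)) := by
  induction pl generalizing acc with
  | nil => rfl
  | cons ev t ih =>
    simp only [List.foldl, List.flatten_cons, List.map_append]
    rw [ih, PySem.Set.update, PySem.Set.update, PySem.Set.update, List.foldl_append]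

-- per-evaluator dict: membership and value, under unique session keys
theorem evTotalsB_keys (ev : List (String × List (List Int))) :
    (evTotalsB ev).keys = PySem.Set.ofList (ev.map (fun p => p.1)) := by
  have h := PySem.Dict.keys_foldl_insert_key ev (fun p => p.1)
    (fun _ p => sumPoints p.2) PySem.Dict.empty
  rw [evTotalsB, h]
  exact PySem.Set.update_empty _

theorem evTotalsB_contains (ev : List (String × List (List Int))) (s : String) :
    (evTotalsB ev).contains s = decide (s ∈ ev.map (fun p => p.1)) := by
  rw [PySem.Dict.contains_eq_decide_mem_keys, evTotalsB_keys]
  simp [PySem.Set.mem_ofList]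

theorem ev_filter_nil (ev : List (String × List (List Int))) (s : String)
    (hm : s ∉ ev.map (fun p => p.1)) :
    ev.filter (fun p => p.1 == s) = [] := by
  rw [List.filter_eq_nil_iff]
  intro q hq hbe
  have hqs : q.1 = s := by simpa using hbe
  exact hm (hqs ▸ List.mem_map_of_mem hq)

theorem evTotalsB_getD (ev : List (String × List (List Int)))
    (h : (ev.map (fun p => p.1)).Nodup) (s : String) :
    (evTotalsB ev).getD s 0 = ((ev.filter (fun p => p.1 == s)).map (fun p => sumPoints p.2)).sum := by
  induction ev using List.reverseRecOn with
  | nil => simp [evTotalsB]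
  | append_singleton t p ih =>
    rw [List.map_append] at h
    obtain ⟨h1, _, hdisj⟩ := List.nodup_append.mp h
    have hp : p.1 ∉ t.map (fun q => q.1) := fun hm => hdisj _ hm p.1 (by simp) rfl
    rw [evTotalsB, List.foldl_append]
    simp only [List.foldl_cons, List.foldl_nil]
    rw [show (List.foldl (fun d q => d.insert q.1 (sumPoints q.2)) PySem.Dict.empty t) =
      evTotalsB t from rfl]
    rw [PySem.Dict.getD_insert, List.filter_append]
    by_cases hps : p.1 = s
    · rw [ev_filter_nil t s (hps ▸ hp)]
      simp [hps]
    · have hb : (p.1 == s) = false := by simp [hps]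
      have h2 : ¬ s = p.1 := fun e => hps e.symm
      simp [hb, h2, ih h1]

theorem ev_filter_length (ev : List (String × List (List Int)))
    (h : (ev.map (fun p => p.1)).Nodup) (s : String) :
    (ev.filter (fun p => p.1 == s)).length =
      (if s ∈ ev.map (fun p => p.1) then 1 else 0) := by
  induction ev with
  | nil => simp
  | cons q t ih =>
    rw [List.map_cons, List.nodup_cons] at h
    rw [List.filter_cons, List.map_cons]
    by_cases hqs : q.1 = s
    · have hnt : s ∉ t.map (fun p => p.1) := hqs ▸ h.1
      rw [ev_filter_nil t s hnt]
      simp [hqs]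
    · have h2 : ¬ s = q.1 := fun e => hqs e.symm
      have hb : (q.1 == s) = false := by simp [hqs]
      have hmm : (s ∈ q.1 :: List.map (fun p => p.1) t) ↔ s ∈ List.map (fun p => p.1) t := by
        simp [List.mem_cons, h2]
      by_cases hm : s ∈ List.map (fun p => p.1) t
      · simp [hb, ih h.2, hm, hmm.mpr hm]
      · have hnc : s ∉ q.1 :: List.map (fun p => p.1) t := fun hc => hm (hmm.mp hc)
        simp [hb, ih h.2, hm, hnc]

-- the gathered per-session values in B sum / count to the flattened folds of A
theorem vals_sum (pl : List (List (String × List (List Int))))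
    (hpre : ∀ ev ∈ pl, (ev.map (fun p => p.1)).Nodup) (s : String) :
    (((pl.map evTotalsB).filter (fun t => t.contains s)).map (fun t => t.getD s 0)).sum =
      ((pl.flatten.filter (fun p => p.1 == s)).map (fun p => sumPoints p.2)).sum := by
  induction pl with
  | nil => simp
  | cons ev t ih =>
    have hev := hpre ev (by simp)
    have iht := ih (fun e he => hpre e (by simp [he]))
    simp only [List.map_cons, List.filter_cons, List.flatten_cons, List.filter_append,
      List.map_append, List.sum_append]
    by_cases hm : s ∈ ev.map (fun p => p.1)
    · rw [show (evTotalsB ev).contains s = true by simp [evTotalsB_contains, hm]]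
      simp [iht, evTotalsB_getD ev hev s]
    · rw [show (evTotalsB ev).contains s = false by simp [evTotalsB_contains, hm]]
      simp [ev_filter_nil ev s hm, iht]

theorem vals_len (pl : List (List (String × List (List Int))))
    (hpre : ∀ ev ∈ pl, (ev.map (fun p => p.1)).Nodup) (s : String) :
    ((pl.map evTotalsB).filter (fun t => t.contains s)).length =
      (pl.flatten.filter (fun p => p.1 == s)).length := by
  induction pl with
  | nil => simp
  | cons ev t ih =>
    have hev := hpre ev (by simp)
    have iht := ih (fun e he => hpre e (by simp [he]))
    simp only [List.map_cons, List.filter_cons, List.flatten_cons, List.filter_append,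
      List.length_append]
    by_cases hm : s ∈ ev.map (fun p => p.1)
    · rw [show (evTotalsB ev).contains s = true by simp [evTotalsB_contains, hm]]
      simp [ev_filter_length ev hev s, hm, iht, Nat.add_comm]
    · rw [show (evTotalsB ev).contains s = false by simp [evTotalsB_contains, hm]]
      simp [ev_filter_nil ev s hm, iht]

-- counting fold at a key (Int-valued counts)
theorem getD_fold_modify_one (L : List (String × List (List Int)))
    (d : PySem.Dict String Int) (s : String) :
    (L.foldl (fun d p => d.modify p.1 0 (· + 1)) d).getD s 0 =
      d.getD s 0 + ((L.filter (fun p => p.1 == s)).length : Int) := by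
  have h := getD_fold_modify_add (fun _ => 1) L d s
  simpa [PySem.List.sum_map_const_int] using h

-- ===== VERDICT (by name: the statement is the Claim_ definition above) =====
theorem calculate_spec : Claim_equal_calculate := by
  intro pl _ hpre
  unfold Spec_calculate calculate calculate_alt
  have hout := outerA_decomp pl [] PySem.Dict.empty PySem.Dict.empty
  rw [hout]
  have hsess := sessions_eq pl PySem.Set.empty
  rw [hsess, PySem.Set.update_empty]
  dsimp only
  have hk := keys_fold_modify (fun _ p => (· + sumPoints p.2)) pl.flatten
  rw [hk]
  have hndid : ((PySem.Set.ofList (pl.flatten.map (fun p => p.1))).map (fun s => s)).Nodup := by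
    simp
  have hA := PySem.Dict.items_foldl_insert_fresh (PySem.Set.ofList (pl.flatten.map (fun p => p.1)))
    (fun s => s)
    (fun s => PySem.Int.floordiv
      ((pl.flatten.foldl (fun d p => d.modify p.1 0 (· + sumPoints p.2)) PySem.Dict.empty).getD s 0)
      ((pl.flatten.foldl (fun d p => d.modify p.1 0 (· + 1)) PySem.Dict.empty).getD s 0))
    PySem.Dict.empty (fun a _ => by simp) hndid
  have hB := PySem.Dict.items_foldl_insert_fresh (PySem.Set.ofList (pl.flatten.map (fun p => p.1)))
    (fun s => s)
    (fun s => PySem.Int.floordiv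
      (((pl.map evTotalsB).filter (fun t => t.contains s)).map (fun t => t.getD s 0)).sum
      ((((pl.map evTotalsB).filter (fun t => t.contains s)).map (fun t => t.getD s 0)).length : Int))
    PySem.Dict.empty (fun a _ => by simp) hndid
  rw [hA, hB]
  refine Prod.ext (by simp) ?_
  simp only [List.nil_append]
  refine congrArg _ (List.map_congr_left ?_)
  intro s _
  refine congrArg _ ?_
  have h1 := getD_fold_modify_add (fun p => sumPoints p.2) pl.flatten PySem.Dict.empty s
  have h2 := getD_fold_modify_one pl.flatten PySem.Dict.empty s
  rw [h1, h2, vals_sum pl hpre s]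
  simp [List.length_map, vals_len pl hpre s]
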